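-- pv_equiv track=rewrite | github.com/minhnguyen10/CSCI-5541-Natural-Language-Processing | HW4/classifier_copyV7.py | get_trigrams_toks
-- ===== SOURCE A (Python) =====
-- def get_trigrams_toks(toks):
-- 	trigrams={}
-- 	i = 0
-- 	# length=len(toks)-2
-- 	while i < (len(toks)-2):
-- 		if toks[i] not in trigrams:
-- 			trigrams[toks[i]]={}
-- 		if toks[i+1] not in trigrams[toks[i]]:
-- 			trigrams[toks[i]][toks[i+1]] = {}
-- 		if toks[i+2] not in trigrams[toks[i]][toks[i+1]]:
-- 			trigrams[toks[i]][toks[i+1]][toks[i+2]] = 1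
-- 		else:
-- 			trigrams[toks[i]][toks[i+1]][toks[i+2]] += 1
-- 		i += 1
-- 	return trigrams
-- ===== SOURCE B (Python) =====
-- def get_trigrams_toks(toks):
-- 	# two-pass: flat trigram tally first, then assemble the nested dict
-- 	counts = {}
-- 	for tri in zip(toks, toks[1:], toks[2:]):
-- 		counts[tri] = counts.get(tri, 0) + 1
-- 	trigrams = {}
-- 	for (a, b, c), n in counts.items():
-- 		trigrams.setdefault(a, {}).setdefault(b, {})[c] = n
-- 	return trigrams
-- ===== Notes on version B (the rewrite author's own statement) =====
-- stated objective: alternative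
-- what changed: A builds the nested dict in one index-guarded while loop, interleaving membership tests and increments; B first tallies all trigrams flatly (dict keyed by the (a,b,c) tuple over zip(toks, toks[1:], toks[2:])) and then assembles the three-level nested dict from those (tuple, count) pairs in a second pass.
import Mathlib
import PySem

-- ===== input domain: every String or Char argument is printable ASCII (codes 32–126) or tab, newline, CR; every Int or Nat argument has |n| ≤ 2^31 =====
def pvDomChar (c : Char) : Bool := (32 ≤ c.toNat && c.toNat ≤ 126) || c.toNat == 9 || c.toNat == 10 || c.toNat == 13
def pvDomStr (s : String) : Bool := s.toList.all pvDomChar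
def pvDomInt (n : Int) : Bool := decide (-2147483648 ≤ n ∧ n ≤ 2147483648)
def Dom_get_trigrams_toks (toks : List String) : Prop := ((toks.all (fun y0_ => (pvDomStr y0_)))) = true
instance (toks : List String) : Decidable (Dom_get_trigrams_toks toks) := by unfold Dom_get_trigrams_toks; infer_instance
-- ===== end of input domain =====

-- B builds the same nested trigram counts by a flat tally followed by an assembly pass
-- (alternative decomposition, same cost); A's return value is proved equal to B's on all inputs.

-- ===== PORT A =====
-- the body of A's while loop, one iteration at index i (dict mutation = re-insert along the path)
def trigramStepA (trigrams : PySem.Dict String (PySem.Dict String (PySem.Dict String Int)))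
    (a b c : String) : PySem.Dict String (PySem.Dict String (PySem.Dict String Int)) :=
  let st := if ¬ trigrams.contains a then trigrams.insert a PySem.Dict.empty else trigrams
  let st := if ¬ (st.getD a PySem.Dict.empty).contains b then
              st.insert a ((st.getD a PySem.Dict.empty).insert b PySem.Dict.empty)
            else st
  let d1 := st.getD a PySem.Dict.empty
  let d2 := d1.getD b PySem.Dict.empty
  if ¬ d2.contains c then st.insert a (d1.insert b (d2.insert c 1))
  else st.insert a (d1.insert b (d2.insert c (d2.getD c 0 + 1)))

-- the while loop: i runs while i < len(toks) - 2
def trigramLoopA (toks : List String)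
    (trigrams : PySem.Dict String (PySem.Dict String (PySem.Dict String Int))) (i : Int) :
    PySem.Dict String (PySem.Dict String (PySem.Dict String Int)) :=
  if _h : i < PySem.List.len toks - 2 then
    trigramLoopA toks
      (trigramStepA trigrams (PySem.List.pyGetD toks i "") (PySem.List.pyGetD toks (i+1) "")
        (PySem.List.pyGetD toks (i+2) "")) (i + 1)
  else trigrams
termination_by (PySem.List.len toks - 2 - i).toNat
decreasing_by simp [PySem.List.len_eq] at *; omega

def get_trigrams_toks (toks : List String) : List (String × List (String × List (String × Int))) :=
  (trigramLoopA toks PySem.Dict.empty 0).items.map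
    (fun p => (p.1, p.2.items.map (fun q => (q.1, q.2.items))))

-- ===== PORT B =====
-- assembly step for one ((a,b,c), n) pair: trigrams.setdefault(a,{}).setdefault(b,{})[c] = n
def trigramStepB (st : PySem.Dict String (PySem.Dict String (PySem.Dict String Int)))
    (p : (String × String × String) × Int) : PySem.Dict String (PySem.Dict String (PySem.Dict String Int)) :=
  let a := p.1.1; let b := p.1.2.1; let c := p.1.2.2
  let st := st.setdefault a PySem.Dict.empty
  let d1 := (st.getD a PySem.Dict.empty).setdefault b PySem.Dict.empty
  st.insert a (d1.insert b ((d1.getD b PySem.Dict.empty).insert c p.2))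

def get_trigrams_toks_alt (toks : List String) : List (String × List (String × List (String × Int))) :=
  let ts := toks.zip ((PySem.List.slice toks (some 1) none).zip (PySem.List.slice toks (some 2) none))
  let counts := ts.foldl (fun d t => d.insert t (d.getD t 0 + 1)) PySem.Dict.empty
  let trigrams := counts.items.foldl trigramStepB PySem.Dict.empty
  trigrams.items.map (fun p => (p.1, p.2.items.map (fun q => (q.1, q.2.items))))

-- ===== PRECONDITION & SPEC =====
def Spec_get_trigrams_toks (toks : List String) (out : List (String × List (String × List (String × Int)))) : Prop := out = get_trigrams_toks_alt toks
instance (toks : List String) (out : List (String × List (String × List (String × Int)))) : Decidable (Spec_get_trigrams_toks toks out) := by unfold Spec_get_trigrams_toks; infer_instance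

-- ===== CLAIM (what is proved, stated in full; the proofs are below) =====
def Claim_equal_get_trigrams_toks : Prop := ∀ (toks : List String), Dom_get_trigrams_toks toks → Spec_get_trigrams_toks toks (get_trigrams_toks toks)

-- ===== LEMMAS AND PROOFS =====

-- proof-side views of the two step functions: three levels of "insert under key"
def gA2 (d2 : PySem.Dict String Int) (t : String × String × String) : PySem.Dict String Int :=
  d2.insert t.2.2 (d2.getD t.2.2 0 + 1)
def gA1 (d1 : PySem.Dict String (PySem.Dict String Int)) (t : String × String × String) :
    PySem.Dict String (PySem.Dict String Int) :=
  d1.insert t.2.1 (gA2 (d1.getD t.2.1 PySem.Dict.empty) t)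
def gA0 (st : PySem.Dict String (PySem.Dict String (PySem.Dict String Int)))
    (t : String × String × String) : PySem.Dict String (PySem.Dict String (PySem.Dict String Int)) :=
  st.insert t.1 (gA1 (st.getD t.1 PySem.Dict.empty) t)
def gB2 (d2 : PySem.Dict String Int) (p : (String × String × String) × Int) : PySem.Dict String Int :=
  d2.insert p.1.2.2 p.2
def gB1 (d1 : PySem.Dict String (PySem.Dict String Int)) (p : (String × String × String) × Int) :
    PySem.Dict String (PySem.Dict String Int) :=
  d1.insert p.1.2.1 (gB2 (d1.getD p.1.2.1 PySem.Dict.empty) p)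
def gB0 (st : PySem.Dict String (PySem.Dict String (PySem.Dict String Int)))
    (p : (String × String × String) × Int) :
    PySem.Dict String (PySem.Dict String (PySem.Dict String Int)) :=
  st.insert p.1.1 (gB1 (st.getD p.1.1 PySem.Dict.empty) p)

lemma stepA_eq (st : PySem.Dict String (PySem.Dict String (PySem.Dict String Int)))
    (a b c : String) : trigramStepA st a b c = gA0 st (a, b, c) := by
  unfold trigramStepA gA0 gA1 gA2
  by_cases ha : st.contains a
  all_goals by_cases hb : (st.getD a PySem.Dict.empty).contains b
  all_goals by_cases hc : ((st.getD a PySem.Dict.empty).getD b PySem.Dict.empty).contains c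
  all_goals simp [ha, hb, hc, Bool.not_eq_true, PySem.Dict.getD_insert_self,
    PySem.Dict.insert_insert_self, PySem.Dict.getD_of_not_contains, PySem.Dict.getD_empty,
    PySem.Dict.contains_empty, PySem.Dict.contains_insert_self]

lemma stepB_eq (st : PySem.Dict String (PySem.Dict String (PySem.Dict String Int)))
    (p : (String × String × String) × Int) : trigramStepB st p = gB0 st p := by
  unfold trigramStepB gB0 gB1 gB2
  by_cases ha : st.contains p.1.1
  all_goals by_cases hb : (st.getD p.1.1 PySem.Dict.empty).contains p.1.2.1
  all_goals simp [ha, hb, Bool.not_eq_true, PySem.Dict.setdefault_of_contains,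
    PySem.Dict.setdefault_of_not_contains, PySem.Dict.getD_insert_self,
    PySem.Dict.insert_insert_self, PySem.Dict.getD_of_not_contains, PySem.Dict.getD_empty,
    PySem.Dict.getD_setdefault_self]

-- the trigram stream of A's index loop = zip(toks, toks[1:], toks[2:])
def tri (toks : List String) : List (String × String × String) :=
  toks.zip ((toks.drop 1).zip (toks.drop 2))

lemma tri_length (toks : List String) : (tri toks).length = toks.length - 2 := by
  simp [tri]; omega

lemma tri_drop_cons (toks : List String) (i : Nat) (h : i + 2 < toks.length) :
    (tri toks).drop i
      = (toks[i]'(by omega), toks[i+1]'(by omega), toks[i+2]'(by omega)) :: (tri toks).drop (i+1) := by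
  have hi : i < (tri toks).length := by rw [tri_length]; omega
  rw [List.drop_eq_getElem_cons hi]
  congr 1
  simp [tri, List.getElem_zip, List.getElem_drop, Nat.add_comm]

lemma loopA_eq (toks : List String) (n : Nat) : ∀ (i : Nat)
    (st : PySem.Dict String (PySem.Dict String (PySem.Dict String Int))),
    toks.length ≤ i + 2 + n →
    trigramLoopA toks st i
      = ((tri toks).drop i).foldl (fun st t => trigramStepA st t.1 t.2.1 t.2.2) st := by
  induction n with
  | zero =>
    intro i st hle
    rw [trigramLoopA]
    have h1 : ¬ ((i : Int) < PySem.List.len toks - 2) := by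
      simp [PySem.List.len_eq]; omega
    rw [dif_neg h1, List.drop_eq_nil_of_le (by rw [tri_length]; omega), List.foldl_nil]
  | succ n ih =>
    intro i st hle
    rw [trigramLoopA]
    by_cases h1 : (i : Int) < PySem.List.len toks - 2
    · have hlt : i + 2 < toks.length := by simp [PySem.List.len_eq] at h1; omega
      have e1 : (i : Int) + 1 = ((i + 1 : Nat) : Int) := by push_cast; ring
      have e2 : (i : Int) + 2 = ((i + 2 : Nat) : Int) := by push_cast; ring
      have gi : PySem.List.pyGetD toks (i : Int) "" = toks[i]'(by omega) := by
        rw [PySem.List.pyGetD_natCast]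
        simp [List.getD_eq_getElem?_getD, (show i < toks.length by omega)]
      have gi1 : PySem.List.pyGetD toks ((i : Int) + 1) "" = toks[i+1]'(by omega) := by
        rw [e1, PySem.List.pyGetD_natCast]
        simp [List.getD_eq_getElem?_getD, (show i + 1 < toks.length by omega)]
      have gi2 : PySem.List.pyGetD toks ((i : Int) + 2) "" = toks[i+2]'(by omega) := by
        rw [e2, PySem.List.pyGetD_natCast]
        simp [List.getD_eq_getElem?_getD, hlt]
      rw [dif_pos h1, tri_drop_cons toks i hlt, List.foldl_cons, gi, gi1, gi2, e1,
        ih (i+1) _ (by omega)]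
    · rw [dif_neg h1, List.drop_eq_nil_of_le (by
        rw [tri_length]; simp [PySem.List.len_eq] at h1; omega), List.foldl_nil]

-- generic facts about one level of "insert under key" folds
lemma keyed_getD {κ α β : Type} [BEq κ] [LawfulBEq κ] [DecidableEq κ] (key : α → κ)
    (g : β → α → β) (dflt : β)
    (L : List α) : ∀ (st : PySem.Dict κ β) (k : κ),
    (L.foldl (fun st x => st.insert (key x) (g (st.getD (key x) dflt) x)) st).getD k dflt
      = (L.filter (fun x => key x == k)).foldl g (st.getD k dflt) := by
  induction L with
  | nil => intro st k; rfl
  | cons x L ih =>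
    intro st k
    rw [List.foldl_cons, ih, List.filter_cons]
    by_cases h : key x == k
    · have hk : k = key x := (eq_of_beq h).symm
      simp [h, PySem.Dict.getD_insert, hk]
    · have hk : ¬ k = key x := fun e => by simp [e] at h
      simp [h, PySem.Dict.getD_insert, hk]

lemma keyed_items {κ α β : Type} [BEq κ] [LawfulBEq κ] [DecidableEq κ] (key : α → κ)
    (g : β → α → β) (dflt : β) (L : List α) :
    (L.foldl (fun st x => st.insert (key x) (g (st.getD (key x) dflt) x)) PySem.Dict.empty).items
      = (PySem.Set.ofList (L.map key)).map
          (fun k => (k, (L.filter (fun x => key x == k)).foldl g dflt)) := by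
  rw [PySem.Dict.items_eq_map_keys _
    (PySem.Dict.nodup_keys_foldl_insert_key L key _ _ PySem.Dict.nodup_keys_empty) dflt,
    PySem.Dict.keys_foldl_insert_key]
  refine List.map_congr_left (fun k hk => ?_)
  rw [keyed_getD, PySem.Dict.getD_empty]

-- dedup/filter/count bookkeeping
lemma ofList_map_ofList {α β : Type} [BEq α] [LawfulBEq α] [BEq β] [LawfulBEq β]
    (f : α → β) (l : List α) :
    PySem.Set.ofList ((PySem.Set.ofList l).map f) = PySem.Set.ofList (l.map f) := by
  induction l using List.reverseRecOn with
  | nil => rfl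
  | append_singleton l x ih =>
    rw [PySem.Set.ofList_append_singleton, List.map_append, List.map_singleton,
      PySem.Set.ofList_append_singleton]
    by_cases hx : x ∈ l
    · rw [PySem.Set.add_of_mem ((PySem.Set.mem_ofList l x).mpr hx), ih,
        PySem.Set.add_of_mem (show f x ∈ PySem.Set.ofList (l.map f) from
          (PySem.Set.mem_ofList _ _).mpr (List.mem_map.mpr ⟨x, hx, rfl⟩))]
    · rw [PySem.Set.add_of_not_mem (fun hm => hx ((PySem.Set.mem_ofList l x).mp hm)),
        List.map_append, List.map_singleton, PySem.Set.ofList_append_singleton, ih]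

lemma filter_ofList {α : Type} [BEq α] [LawfulBEq α] (p : α → Bool) (l : List α) :
    (PySem.Set.ofList l).filter p = PySem.Set.ofList (l.filter p) := by
  induction l using List.reverseRecOn with
  | nil => rfl
  | append_singleton l x ih =>
    rw [PySem.Set.ofList_append_singleton, List.filter_append]
    by_cases hx : x ∈ l
    · rw [PySem.Set.add_of_mem ((PySem.Set.mem_ofList l x).mpr hx), ih]
      by_cases hp : p x
      · simp only [List.filter_singleton, hp, cond_true, PySem.Set.ofList_append_singleton]
        rw [PySem.Set.add_of_mem ((PySem.Set.mem_ofList _ _).mpr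
          (List.mem_filter.mpr ⟨hx, hp⟩))]
      · simp [hp]
    · rw [PySem.Set.add_of_not_mem (fun hm => hx ((PySem.Set.mem_ofList l x).mp hm)),
        List.filter_append, ih]
      by_cases hp : p x
      · simp only [List.filter_singleton, hp, cond_true, PySem.Set.ofList_append_singleton]
        rw [PySem.Set.add_of_not_mem (fun hm =>
          hx (List.mem_filter.mp ((PySem.Set.mem_ofList _ _).mp hm)).1)]
      · simp [hp]

lemma ofList_map_inj {α β : Type} [BEq α] [LawfulBEq α] [BEq β] [LawfulBEq β]
    (f : α → β) (l : List α)
    (h : ∀ x ∈ l, ∀ y ∈ l, f x = f y → x = y) :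
    PySem.Set.ofList (l.map f) = (PySem.Set.ofList l).map f := by
  induction l using List.reverseRecOn with
  | nil => rfl
  | append_singleton l x ih =>
    have h' : ∀ a ∈ l, ∀ b ∈ l, f a = f b → a = b := fun a ha b hb =>
      h a (List.mem_append_left _ ha) b (List.mem_append_left _ hb)
    rw [List.map_append, List.map_singleton, PySem.Set.ofList_append_singleton,
      PySem.Set.ofList_append_singleton, ih h']
    by_cases hx : x ∈ l
    · rw [PySem.Set.add_of_mem ((PySem.Set.mem_ofList l x).mpr hx),
        PySem.Set.add_of_mem (List.mem_map.mpr ⟨x, (PySem.Set.mem_ofList l x).mpr hx, rfl⟩)]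
    · have hnx : f x ∉ (PySem.Set.ofList l).map f := by
        intro hmem
        obtain ⟨y, hy, hfy⟩ := List.mem_map.mp hmem
        have hyl := (PySem.Set.mem_ofList l y).mp hy
        exact hx (h y (List.mem_append_left _ hyl) x
          (List.mem_append_right _ (List.mem_singleton_self x)) hfy ▸ hyl)
      rw [PySem.Set.add_of_not_mem (fun hm => hx ((PySem.Set.mem_ofList l x).mp hm)),
        PySem.Set.add_of_not_mem hnx, List.map_append, List.map_singleton]

lemma count_map_inj {α β : Type} [BEq α] [LawfulBEq α] [BEq β] [LawfulBEq β]
    (f : α → β) (l : List α) (k : α)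
    (h : ∀ t ∈ l, f t = f k → t = k) : (l.map f).count (f k) = l.count k := by
  induction l with
  | nil => rfl
  | cons x l ih =>
    rw [List.map_cons, List.count_cons, List.count_cons,
      ih (fun t ht => h t (List.mem_cons_of_mem _ ht))]
    by_cases hx : f x = f k
    · simp [hx, h x (List.mem_cons_self) hx]
    · have : ¬ x = k := fun e => hx (by rw [e])
      simp [hx, this]

-- level 3 (leaf dicts): interleaved counting = assigning final counts once per key
lemma lvl3 (l : List (String × String × String))
    (hinj : ∀ t ∈ l, ∀ t' ∈ l, t.2.2 = t'.2.2 → t = t') :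
    l.foldl gA2 PySem.Dict.empty
      = ((PySem.Set.ofList l).map (fun k => (k, (l.count k : Int)))).foldl gB2
          PySem.Dict.empty := by
  apply PySem.Dict.ext
  have hA : l.foldl gA2 PySem.Dict.empty = PySem.Dict.counter (l.map (fun t => t.2.2)) := by
    rw [← PySem.Dict.foldl_insert_getD_add_one_eq_counter, List.foldl_map]
    rfl
  have hfresh : ∀ a ∈ (PySem.Set.ofList l).map (fun k => (k, (l.count k : Int))),
      (PySem.Dict.empty : PySem.Dict String Int).contains a.1.2.2 = false := by
    intro a _; exact PySem.Dict.contains_empty _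
  have hnd : (((PySem.Set.ofList l).map (fun k => (k, (l.count k : Int)))).map
      (fun p => p.1.2.2)).Nodup := by
    rw [List.map_map]
    exact List.Nodup.map_on
      (fun x hx y hy hxy => hinj x ((PySem.Set.mem_ofList l x).mp hx) y
        ((PySem.Set.mem_ofList l y).mp hy) hxy)
      (PySem.Set.nodup_ofList l)
  have hB := PySem.Dict.items_foldl_insert_fresh
    ((PySem.Set.ofList l).map (fun k => (k, (l.count k : Int))))
    (fun p => p.1.2.2) (fun p => p.2) PySem.Dict.empty hfresh hnd
  rw [hA, PySem.Dict.items_counter, (show ((PySem.Set.ofList l).map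
      (fun k => (k, (l.count k : Int)))).foldl gB2 PySem.Dict.empty
      = ((PySem.Set.ofList l).map (fun k => (k, (l.count k : Int)))).foldl
          (fun d p => d.insert p.1.2.2 p.2) PySem.Dict.empty from rfl), hB,
    (show (PySem.Dict.empty : PySem.Dict String Int).items = [] from rfl),
    List.nil_append, List.map_map,
    ofList_map_inj (fun t => t.2.2) l hinj, List.map_map]
  refine List.map_congr_left (fun k hk => ?_)
  have hkl : k ∈ l := (PySem.Set.mem_ofList l k).mp hk
  simp only [Function.comp]
  rw [count_map_inj (fun t => t.2.2) l k (fun t ht h' => hinj t ht k hkl h')]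

-- level 2: one inner dict, all trigrams sharing the first token
lemma lvl2 (a : String) (l : List (String × String × String))
    (ha : ∀ t ∈ l, t.1 = a) :
    l.foldl gA1 PySem.Dict.empty
      = ((PySem.Set.ofList l).map (fun k => (k, (l.count k : Int)))).foldl gB1
          PySem.Dict.empty := by
  apply PySem.Dict.ext
  rw [(show l.foldl gA1 PySem.Dict.empty = l.foldl (fun st x =>
        st.insert x.2.1 (gA2 (st.getD x.2.1 PySem.Dict.empty) x)) PySem.Dict.empty from rfl),
    keyed_items (fun t => t.2.1) gA2 PySem.Dict.empty l,
    (show ((PySem.Set.ofList l).map (fun k => (k, (l.count k : Int)))).foldl gB1 PySem.Dict.empty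
      = ((PySem.Set.ofList l).map (fun k => (k, (l.count k : Int)))).foldl (fun st x =>
          st.insert x.1.2.1 (gB2 (st.getD x.1.2.1 PySem.Dict.empty) x)) PySem.Dict.empty from rfl),
    keyed_items (fun p => p.1.2.1) gB2 PySem.Dict.empty _, List.map_map,
    (show ((fun p => p.1.2.1) ∘ (fun k => (k, (l.count k : Int)))) = (fun t => t.2.1) from rfl),
    ofList_map_ofList]
  refine List.map_congr_left (fun b hb => ?_)
  rw [List.filter_map,
    (show ((fun x => x.1.2.1 == b) ∘ (fun k => (k, (l.count k : Int)))) = (fun t => t.2.1 == b)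
      from rfl), filter_ofList]
  have hcnt : (PySem.Set.ofList (l.filter (fun t => t.2.1 == b))).map
        (fun k => (k, (l.count k : Int)))
      = (PySem.Set.ofList (l.filter (fun t => t.2.1 == b))).map
        (fun k => (k, ((l.filter (fun t => t.2.1 == b)).count k : Int))) := by
    refine List.map_congr_left (fun k hk => ?_)
    have hmem := (PySem.Set.mem_ofList _ k).mp hk
    rw [List.count_filter (p := fun t => t.2.1 == b) (a := k) (List.mem_filter.mp hmem).2]
  rw [hcnt, ← lvl3 (l.filter (fun t => t.2.1 == b)) (by
    intro t ht t' ht' hcc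
    have ht1 := List.mem_filter.mp ht
    have ht2 := List.mem_filter.mp ht'
    have e1 : t.1 = t'.1 := by rw [ha t ht1.1, ha t' ht2.1]
    have e2 : t.2.1 = t'.2.1 := by
      rw [(by exact eq_of_beq ht1.2 : t.2.1 = b), (by exact eq_of_beq ht2.2 : t'.2.1 = b)]
    obtain ⟨x1, x2, x3⟩ := t
    obtain ⟨y1, y2, y3⟩ := t'
    simp_all)]

-- level 1: the whole nested dict
lemma lvl1 (l : List (String × String × String)) :
    l.foldl gA0 PySem.Dict.empty
      = ((PySem.Set.ofList l).map (fun k => (k, (l.count k : Int)))).foldl gB0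
          PySem.Dict.empty := by
  apply PySem.Dict.ext
  rw [(show l.foldl gA0 PySem.Dict.empty = l.foldl (fun st x =>
        st.insert x.1 (gA1 (st.getD x.1 PySem.Dict.empty) x)) PySem.Dict.empty from rfl),
    keyed_items (fun t => t.1) gA1 PySem.Dict.empty l,
    (show ((PySem.Set.ofList l).map (fun k => (k, (l.count k : Int)))).foldl gB0 PySem.Dict.empty
      = ((PySem.Set.ofList l).map (fun k => (k, (l.count k : Int)))).foldl (fun st x =>
          st.insert x.1.1 (gB1 (st.getD x.1.1 PySem.Dict.empty) x)) PySem.Dict.empty from rfl),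
    keyed_items (fun p => p.1.1) gB1 PySem.Dict.empty _, List.map_map,
    (show ((fun p => p.1.1) ∘ (fun k => (k, (l.count k : Int)))) = (fun t => t.1) from rfl),
    ofList_map_ofList]
  refine List.map_congr_left (fun a hb => ?_)
  rw [List.filter_map,
    (show ((fun x => x.1.1 == a) ∘ (fun k => (k, (l.count k : Int)))) = (fun t => t.1 == a)
      from rfl), filter_ofList]
  have hcnt : (PySem.Set.ofList (l.filter (fun t => t.1 == a))).map
        (fun k => (k, (l.count k : Int)))
      = (PySem.Set.ofList (l.filter (fun t => t.1 == a))).map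
        (fun k => (k, ((l.filter (fun t => t.1 == a)).count k : Int))) := by
    refine List.map_congr_left (fun k hk => ?_)
    have hmem := (PySem.Set.mem_ofList _ k).mp hk
    rw [List.count_filter (p := fun t => t.1 == a) (a := k) (List.mem_filter.mp hmem).2]
  rw [hcnt, ← lvl2 a (l.filter (fun t => t.1 == a))
    (fun t ht => eq_of_beq (List.mem_filter.mp ht).2)]

-- the two dicts agree
lemma main_eq (toks : List String) :
    trigramLoopA toks PySem.Dict.empty 0
      = ((tri toks).foldl (fun d t => d.insert t (d.getD t 0 + 1))
          PySem.Dict.empty).items.foldl trigramStepB PySem.Dict.empty := by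
  have h0 := loopA_eq toks toks.length 0 PySem.Dict.empty (by omega)
  simp only [Nat.cast_zero, List.drop_zero] at h0
  rw [h0, PySem.Dict.foldl_insert_getD_add_one_eq_counter, PySem.Dict.items_counter]
  have hA : ((tri toks).foldl (fun st t => trigramStepA st t.1 t.2.1 t.2.2) PySem.Dict.empty)
      = (tri toks).foldl gA0 PySem.Dict.empty := by
    simp only [stepA_eq]
  have hB : (((PySem.Set.ofList (tri toks)).map
        (fun k => (k, ((tri toks).count k : Int)))).foldl trigramStepB PySem.Dict.empty)
      = ((PySem.Set.ofList (tri toks)).map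
        (fun k => (k, ((tri toks).count k : Int)))).foldl gB0 PySem.Dict.empty := by
    rw [show trigramStepB = gB0 from funext fun st => funext fun p => stepB_eq st p]
  rw [hA, hB, lvl1]

-- ===== VERDICT (by name: the statement is the Claim_ definition above) =====
theorem get_trigrams_toks_spec : Claim_equal_get_trigrams_toks := by
  unfold Claim_equal_get_trigrams_toks
  intro toks _
  unfold Spec_get_trigrams_toks get_trigrams_toks get_trigrams_toks_alt
  have hslice1 : PySem.List.slice toks (some 1) none = toks.drop 1 := by
    rw [PySem.List.slice_from _ (by omega)]; rfl
  have hslice2 : PySem.List.slice toks (some 2) none = toks.drop 2 := by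
    rw [PySem.List.slice_from _ (by omega)]; rfl
  rw [hslice1, hslice2]
  rw [(show toks.zip ((toks.drop 1).zip (toks.drop 2)) = tri toks from rfl), main_eq]
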